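-- pv_equiv track=rewrite | github.com/LeaderMalang/oktts | voucher/management/commands/import_customers.py | split_city_area
-- ===== SOURCE A (Python) =====
-- def split_city_area(label: str):
--     """
--     Heuristic split of 'TOBA TEK SINGH TTS CITY' -> ('TOBA TEK SINGH','TTS CITY')
--     Rules:
--       1) Prefer known multi-word city prefixes (common in PK): try 3 words, then 2.
--       2) If label contains ' CITY' or ' ROAD' etc., take everything after the city guess as area.
--       3) Fallback: first word = city, rest = area.
--     You can extend CITY_HINTS to suit your data.
--     """
--     label = " ".join(label.split())
--     parts = label.split()
--
--     CITY_HINTS = {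
--         # add more if needed
--         "TOBA TEK SINGH",
--         "KAMALIA",
--         "JHANG",
--         "SANDHILIANWALI",
--         "SHORKOT",
--         "PIRMAHAL",
--         "GOJRA",
--     }
--
--     # try 3-word city, then 2-word, else 1-word
--     for n in (3, 2, 1):
--         if len(parts) >= n:
--             ctry = " ".join(parts[:n])
--             if ctry in CITY_HINTS or n == 1:
--                 city = ctry
--                 area = " ".join(parts[n:]).strip() or ctry  # if nothing left, duplicate as area
--                 return city, area
--
--     # fallback
--     return label, label
-- ===== SOURCE B (Python) =====
-- CITY_HINTS = (
--     "TOBA TEK SINGH",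
--     "KAMALIA",
--     "JHANG",
--     "SANDHILIANWALI",
--     "SHORKOT",
--     "PIRMAHAL",
--     "GOJRA",
-- )
--
--
-- def split_city_area(label: str):
--     """Longest-prefix hint match over the hint table instead of a (3,2,1) length loop."""
--     label = " ".join(label.split())
--     parts = label.split()
--     best = 0
--     for hint in CITY_HINTS:
--         words = hint.split()
--         if len(words) > best and parts[:len(words)] == words:
--             best = len(words)
--     if best == 0:
--         if not parts:
--             return label, label
--         best = 1
--     city = " ".join(parts[:best])
--     area = " ".join(parts[best:]) or city
--     return city, area
-- ===== Notes on version B (the rewrite author's own statement) =====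
-- stated objective: alternative
-- what changed: Replaces the (3,2,1) prefix-length loop with set membership by a single scan over the hint table that compares each hint's word list against the label's leading words and keeps the longest match.
import Mathlib
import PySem

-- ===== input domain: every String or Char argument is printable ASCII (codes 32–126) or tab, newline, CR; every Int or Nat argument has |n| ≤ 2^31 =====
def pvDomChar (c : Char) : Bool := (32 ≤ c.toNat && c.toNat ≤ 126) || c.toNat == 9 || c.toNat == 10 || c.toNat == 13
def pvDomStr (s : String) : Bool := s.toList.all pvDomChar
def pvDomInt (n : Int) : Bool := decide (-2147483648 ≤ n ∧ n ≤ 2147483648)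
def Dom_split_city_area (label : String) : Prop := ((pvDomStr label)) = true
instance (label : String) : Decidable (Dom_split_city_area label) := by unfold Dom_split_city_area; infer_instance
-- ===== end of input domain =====

-- B replaces A's (3,2,1) prefix-length loop by a longest-match scan over the hint table (alternative decomposition, same cost).

-- ===== PORT A =====
def cityHints : PySem.Set String :=
  PySem.Set.ofList ["TOBA TEK SINGH", "KAMALIA", "JHANG", "SANDHILIANWALI", "SHORKOT", "PIRMAHAL", "GOJRA"]

-- the 'for n in (3, 2, 1)' loop with its early returns
def splitLoopA (parts : List String) : List Int → Option (String × String)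
  | [] => none
  | n :: rest =>
    if n ≤ (parts.length : Int) then
      let ctry := PySem.Str.join " " (PySem.List.slice parts none (some n))
      if ctry ∈ cityHints ∨ n = 1 then
        let a := PySem.Str.strip (PySem.Str.join " " (PySem.List.slice parts (some n) none))
        some (ctry, if a = "" then ctry else a)
      else splitLoopA parts rest
    else splitLoopA parts rest

def split_city_area (label : String) : String × String :=
  let lbl := PySem.Str.join " " (PySem.Str.split₀ label)
  let parts := PySem.Str.split₀ lbl
  match splitLoopA parts [3, 2, 1] with
  | some r => r
  | none => (lbl, lbl)

-- ===== PORT B =====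
def cityHintsList : List String :=
  ["TOBA TEK SINGH", "KAMALIA", "JHANG", "SANDHILIANWALI", "SHORKOT", "PIRMAHAL", "GOJRA"]

def split_city_area_alt (label : String) : String × String :=
  let lbl := PySem.Str.join " " (PySem.Str.split₀ label)
  let parts := PySem.Str.split₀ lbl
  let best := cityHintsList.foldl (fun best h =>
    let words := PySem.Str.split₀ h
    if best < words.length ∧ parts.take words.length = words then words.length else best) 0
  if best = 0 ∧ parts = [] then (lbl, lbl)
  else
    let n := if best = 0 then 1 else best
    let city := PySem.Str.join " " (parts.take n)
    let area := PySem.Str.join " " (parts.drop n)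
    (city, if area = "" then city else area)

-- ===== PRECONDITION & SPEC =====
def Spec_split_city_area (label : String) (out : String × String) : Prop := out = split_city_area_alt label
instance (label : String) (out : String × String) : Decidable (Spec_split_city_area label out) := by unfold Spec_split_city_area; infer_instance

-- ===== CLAIM (what is proved, stated in full; the proofs are below) =====
def Claim_equal_split_city_area : Prop := ∀ (label : String), Dom_split_city_area label → Spec_split_city_area label (split_city_area label)

-- ===== LEMMAS AND PROOFS =====

def WFree (w : List Char) : Prop := w ≠ [] ∧ ∀ c ∈ w, PySem.Chars.isspace c = false

theorem split₀_go_wfree (s : List Char) : ∀ (cur : List Char) (acc : List (List Char)),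
    (∀ c ∈ cur, PySem.Chars.isspace c = false) →
    (∀ w ∈ acc, WFree w) →
    ∀ w ∈ PySem.Chars.split₀.go s cur acc, WFree w := by
  induction s with
  | nil =>
    intro cur acc hcur hacc w hw
    simp only [PySem.Chars.split₀.go] at hw
    by_cases h : cur.isEmpty
    · simp [h] at hw
      exact hacc _ hw
    · simp [h] at hw
      rcases hw with h' | h'
      · exact hacc _ h'
      · subst h'
        refine ⟨by simpa [List.isEmpty_iff] using h, ?_⟩
        intro c hc; exact hcur c (List.mem_reverse.mp hc)
  | cons c rest ih =>
    intro cur acc hcur hacc w hw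
    simp only [PySem.Chars.split₀.go] at hw
    by_cases hsp : PySem.Chars.isspace c
    · by_cases he : cur.isEmpty
      · simp [hsp, he] at hw
        exact ih [] acc (by simp) hacc w hw
      · simp [hsp, he] at hw
        refine ih [] (cur.reverse :: acc) (by simp) ?_ w hw
        intro v hv
        rcases List.mem_cons.mp hv with h' | h'
        · subst h'
          refine ⟨by simpa [List.isEmpty_iff] using he, ?_⟩
          intro d hd; exact hcur d (by simpa using hd)
        · exact hacc _ h'
    · simp [hsp] at hw
      refine ih (c :: cur) acc ?_ hacc w hw
      intro d hd
      rcases List.mem_cons.mp hd with h' | h'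
      · subst h'; simpa using hsp
      · exact hcur d h'

theorem split₀_wfree (s : List Char) : ∀ w ∈ PySem.Chars.split₀ s, WFree w := by
  intro w hw
  exact split₀_go_wfree s [] [] (by simp) (by simp) w hw

theorem str_split₀_wfree (s : String) : ∀ w ∈ PySem.Str.split₀ s, WFree w.toList := by
  intro w hw
  have : w.toList ∈ (PySem.Str.split₀ s).map String.toList := List.mem_map_of_mem hw
  rw [PySem.Str.split₀_map_toList] at this
  exact split₀_wfree _ _ this

theorem join_cons_cons (w v : List Char) (r : List (List Char)) :
    PySem.Chars.join [' '] (w :: v :: r) = w ++ ' ' :: PySem.Chars.join [' '] (v :: r) := by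
  simp [PySem.Chars.join, List.intercalate]

theorem join_head (ws : List (List Char)) (h : ∀ w ∈ ws, WFree w) (hne : ws ≠ []) :
    ∃ c t, PySem.Chars.join [' '] ws = c :: t ∧ PySem.Chars.isspace c = false := by
  cases ws with
  | nil => simp at hne
  | cons w rest =>
    obtain ⟨hwne, hwsp⟩ := h w (by simp)
    obtain ⟨c, w', rfl⟩ := List.exists_cons_of_ne_nil hwne
    cases rest with
    | nil =>
      exact ⟨c, w', by simp [PySem.Chars.join, List.intercalate], hwsp c (by simp)⟩
    | cons v r =>
      refine ⟨c, w' ++ ' ' :: PySem.Chars.join [' '] (v :: r), ?_, hwsp c (by simp)⟩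
      rw [join_cons_cons]; simp

theorem join_last (ws : List (List Char)) (h : ∀ w ∈ ws, WFree w) (hne : ws ≠ []) :
    ∃ x c, PySem.Chars.join [' '] ws = x ++ [c] ∧ PySem.Chars.isspace c = false := by
  induction ws with
  | nil => simp at hne
  | cons w rest ih =>
    cases rest with
    | nil =>
      obtain ⟨hwne, hwsp⟩ := h w (by simp)
      refine ⟨w.dropLast, w.getLast hwne, ?_, hwsp _ (List.getLast_mem hwne)⟩
      simp [PySem.Chars.join, List.intercalate, List.dropLast_append_getLast hwne]
    | cons v r =>
      obtain ⟨x, c, hx, hc⟩ := ih (fun u hu => h u (by simp [hu])) (by simp)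
      exact ⟨w ++ ' ' :: x, c, by rw [join_cons_cons, hx]; simp, hc⟩

theorem strip_of_head_last (l : List Char) (c d : Char) (t x : List Char)
    (h1 : l = c :: t) (h2 : l = x ++ [d])
    (hc : PySem.Chars.isspace c = false) (hd : PySem.Chars.isspace d = false) :
    PySem.Chars.strip l = l := by
  simp only [PySem.Chars.strip, PySem.Chars.lstrip, PySem.Chars.rstrip]
  rw [h1, List.dropWhile_cons_of_neg (by simp [hc]), ← h1, h2]
  simp [List.dropWhile_cons_of_neg, hd]

theorem join_wfree_strip (ws : List (List Char)) (h : ∀ w ∈ ws, WFree w) :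
    PySem.Chars.strip (PySem.Chars.join [' '] ws) = PySem.Chars.join [' '] ws := by
  cases ws with
  | nil => simp [PySem.Chars.join, List.intercalate, PySem.Chars.strip, PySem.Chars.lstrip, PySem.Chars.rstrip]
  | cons w rest =>
    obtain ⟨c, t, h1, hc⟩ := join_head (w :: rest) h (by simp)
    obtain ⟨x, d, h2, hd⟩ := join_last (w :: rest) h (by simp)
    exact strip_of_head_last _ c d t x h1 h2 hc hd

theorem str_join_strip (ps : List String) (h : ∀ w ∈ ps, WFree w.toList) :
    PySem.Str.strip (PySem.Str.join " " ps) = PySem.Str.join " " ps := by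
  rw [← String.toList_inj, PySem.Str.toList_strip, PySem.Str.toList_join]
  have : (" ".toList) = [' '] := by decide
  rw [this]
  exact join_wfree_strip _ (by intro w hw; obtain ⟨u, hu, rfl⟩ := List.mem_map.mp hw; exact h u hu)

-- factor at first space
theorem factor_space (a : List Char) : ∀ (b r r' : List Char),
    (∀ c ∈ a, PySem.Chars.isspace c = false) → (∀ c ∈ b, PySem.Chars.isspace c = false) →
    a ++ ' ' :: r = b ++ ' ' :: r' → a = b ∧ r = r' := by
  induction a with
  | nil =>
    intro b r r' _ hb h
    cases b with
    | nil => simpa using h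
    | cons x xs =>
      simp at h
      exfalso; have := hb x (by simp); rw [← h.1] at this
      simp [PySem.Chars.isspace] at this
  | cons x xs ih =>
    intro b r r' ha hb h
    cases b with
    | nil =>
      simp at h
      exfalso; have := ha x (by simp); rw [h.1] at this
      simp [PySem.Chars.isspace] at this
    | cons y ys =>
      simp at h
      obtain ⟨hxy, h2⟩ := h
      obtain ⟨h3, h4⟩ := ih ys r r' (fun c hc => ha c (by simp [hc])) (fun c hc => hb c (by simp [hc])) h2
      exact ⟨by simp [hxy, h3], h4⟩

theorem toba_nospace : ∀ c ∈ "TOBA".toList, PySem.Chars.isspace c = false := by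
  intro c hc
  rw [show "TOBA".toList = ['T','O','B','A'] from rfl] at hc
  fin_cases hc <;> rfl

theorem tek_nospace : ∀ c ∈ "TEK".toList, PySem.Chars.isspace c = false := by
  intro c hc
  rw [show "TEK".toList = ['T','E','K'] from rfl] at hc
  fin_cases hc <;> rfl

theorem join2_not_mem (a b : String) (ha : WFree a.toList) (hb : WFree b.toList) :
    PySem.Str.join " " [a, b] ∉ cityHints := by
  intro hmem
  have hj : (PySem.Str.join " " [a,b]).toList = a.toList ++ ' ' :: b.toList := by
    simp [PySem.Str.join, PySem.Chars.join, List.intercalate]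
  rw [cityHints, PySem.Set.mem_ofList] at hmem
  have hsp : ' ' ∈ (PySem.Str.join " " [a,b]).toList := by rw [hj]; simp
  simp only [List.mem_cons, List.not_mem_nil, or_false] at hmem
  rcases hmem with h|h|h|h|h|h|h <;> rw [h] at hsp
  · -- "TOBA TEK SINGH": factoring would force a space into b
    have heq : a.toList ++ ' ' :: b.toList = "TOBA".toList ++ ' ' :: "TEK SINGH".toList := by
      rw [← hj, h]; rfl
    obtain ⟨-, hbeq⟩ := factor_space a.toList "TOBA".toList b.toList "TEK SINGH".toList ha.2
      toba_nospace heq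
    have hmem2 : ' ' ∈ b.toList := by
      rw [hbeq, show "TEK SINGH".toList = ['T','E','K',' ','S','I','N','G','H'] from rfl]; simp
    have := hb.2 ' ' hmem2
    simp [PySem.Chars.isspace] at this
  · rw [show "KAMALIA".toList = ['K','A','M','A','L','I','A'] from rfl] at hsp; simp at hsp
  · rw [show "JHANG".toList = ['J','H','A','N','G'] from rfl] at hsp; simp at hsp
  · rw [show "SANDHILIANWALI".toList = ['S','A','N','D','H','I','L','I','A','N','W','A','L','I'] from rfl] at hsp; simp at hsp
  · rw [show "SHORKOT".toList = ['S','H','O','R','K','O','T'] from rfl] at hsp; simp at hsp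
  · rw [show "PIRMAHAL".toList = ['P','I','R','M','A','H','A','L'] from rfl] at hsp; simp at hsp
  · rw [show "GOJRA".toList = ['G','O','J','R','A'] from rfl] at hsp; simp at hsp

theorem join3_mem (a b c : String) (ha : WFree a.toList) (hb : WFree b.toList) (_hc : WFree c.toList)
    (hmem : PySem.Str.join " " [a, b, c] ∈ cityHints) :
    a = "TOBA" ∧ b = "TEK" ∧ c = "SINGH" := by
  have hj : (PySem.Str.join " " [a,b,c]).toList = a.toList ++ ' ' :: (b.toList ++ ' ' :: c.toList) := by
    simp [PySem.Str.join, PySem.Chars.join, List.intercalate]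
  rw [cityHints, PySem.Set.mem_ofList] at hmem
  have hsp : ' ' ∈ (PySem.Str.join " " [a,b,c]).toList := by rw [hj]; simp
  simp only [List.mem_cons, List.not_mem_nil, or_false] at hmem
  rcases hmem with h|h|h|h|h|h|h
  · have heq : a.toList ++ ' ' :: (b.toList ++ ' ' :: c.toList) =
        "TOBA".toList ++ ' ' :: ("TEK".toList ++ ' ' :: "SINGH".toList) := by
      rw [← hj, h]; rfl
    obtain ⟨h1, h2⟩ := factor_space a.toList "TOBA".toList _ _ ha.2 toba_nospace heq
    obtain ⟨h3, h4⟩ := factor_space b.toList "TEK".toList _ _ hb.2 tek_nospace h2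
    refine ⟨?_, ?_, ?_⟩ <;> rw [← String.toList_inj] <;> assumption
  · rw [h, show "KAMALIA".toList = ['K','A','M','A','L','I','A'] from rfl] at hsp; simp at hsp
  · rw [h, show "JHANG".toList = ['J','H','A','N','G'] from rfl] at hsp; simp at hsp
  · rw [h, show "SANDHILIANWALI".toList = ['S','A','N','D','H','I','L','I','A','N','W','A','L','I'] from rfl] at hsp; simp at hsp
  · rw [h, show "SHORKOT".toList = ['S','H','O','R','K','O','T'] from rfl] at hsp; simp at hsp
  · rw [h, show "PIRMAHAL".toList = ['P','I','R','M','A','H','A','L'] from rfl] at hsp; simp at hsp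
  · rw [h, show "GOJRA".toList = ['G','O','J','R','A'] from rfl] at hsp; simp at hsp

theorem foldl_ones_ge (parts : List String) : ∀ (l : List String) (b : Nat),
    (∀ h ∈ l, (PySem.Str.split₀ h).length = 1) → 2 ≤ b →
    l.foldl (fun best h =>
      let words := PySem.Str.split₀ h
      if best < words.length ∧ parts.take words.length = words then words.length else best) b = b := by
  intro l
  induction l with
  | nil => intro b _ _; rfl
  | cons x xs ih =>
    intro b hl hb
    simp only [List.foldl_cons]
    rw [if_neg, ih b (fun h hh => hl h (by simp [hh])) hb]
    rw [hl x (by simp)]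
    rintro ⟨h1, -⟩; omega

theorem foldl_ones_le_one (parts : List String) : ∀ (l : List String) (b : Nat),
    (∀ h ∈ l, (PySem.Str.split₀ h).length = 1) → b ≤ 1 →
    l.foldl (fun best h =>
      let words := PySem.Str.split₀ h
      if best < words.length ∧ parts.take words.length = words then words.length else best) b ≤ 1 := by
  intro l
  induction l with
  | nil => intro b _ hb; exact hb
  | cons x xs ih =>
    intro b hl hb
    simp only [List.foldl_cons]
    split
    · exact ih _ (fun h hh => hl h (by simp [hh])) (by rw [hl x (by simp)])
    · exact ih _ (fun h hh => hl h (by simp [hh])) hb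

theorem mem_toba : "TOBA TEK SINGH" ∈ cityHints := by
  rw [cityHints, PySem.Set.mem_ofList]; simp

theorem str_join_nil : PySem.Str.join " " ([] : List String) = "" := rfl

theorem str_join_singleton (a : String) : PySem.Str.join " " [a] = a := by
  simp [PySem.Str.join, PySem.Chars.join, List.intercalate]

theorem tailHints_len1 : ∀ h ∈ ["KAMALIA", "JHANG", "SANDHILIANWALI", "SHORKOT", "PIRMAHAL", "GOJRA"],
    (PySem.Str.split₀ h).length = 1 := by
  intro h hh
  fin_cases hh <;> rfl

theorem hsTT : PySem.Str.split₀ "TOBA TEK SINGH" = ["TOBA","TEK","SINGH"] := rfl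

theorem strip_empty : PySem.Str.strip "" = "" := rfl

def pvBestOf (parts : List String) : Nat :=
  cityHintsList.foldl (fun best h =>
    let words := PySem.Str.split₀ h
    if best < words.length ∧ parts.take words.length = words then words.length else best) 0

def pvBcore (lbl : String) (parts : List String) : String × String :=
  if pvBestOf parts = 0 ∧ parts = [] then (lbl, lbl)
  else
    let n := if pvBestOf parts = 0 then 1 else pvBestOf parts
    let city := PySem.Str.join " " (parts.take n)
    let area := PySem.Str.join " " (parts.drop n)
    (city, if area = "" then city else area)

theorem bestOf_le_one (parts : List String) (hm : parts.take 3 ≠ ["TOBA","TEK","SINGH"]) :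
    pvBestOf parts ≤ 1 := by
  unfold pvBestOf cityHintsList
  rw [List.foldl_cons]
  rw [hsTT]
  rw [if_neg (by rintro ⟨-, h⟩; exact hm (by simpa using h))]
  exact foldl_ones_le_one parts _ 0 tailHints_len1 (by norm_num)

theorem bestOf_toba (parts : List String) (hm : parts.take 3 = ["TOBA","TEK","SINGH"]) :
    pvBestOf parts = 3 := by
  unfold pvBestOf cityHintsList
  rw [List.foldl_cons]
  rw [hsTT]
  rw [if_pos (by exact ⟨by norm_num, by simpa using hm⟩)]
  exact foldl_ones_ge parts _ 3 tailHints_len1 (by norm_num)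

theorem Bcore_ne (lbl a : String) (parts' : List String) (hb : pvBestOf (a :: parts') ≤ 1) :
    pvBcore lbl (a :: parts') =
      (a, if PySem.Str.join " " parts' = "" then a else PySem.Str.join " " parts') := by
  unfold pvBcore
  rw [if_neg (by rintro ⟨-, h⟩; exact List.cons_ne_nil a parts' h)]
  have hn : (if pvBestOf (a :: parts') = 0 then 1 else pvBestOf (a :: parts')) = 1 := by
    interval_cases h : pvBestOf (a :: parts') <;> simp
  rw [hn]
  simp [str_join_singleton]

theorem Bcore_toba (lbl : String) (rest : List String) :
    pvBcore lbl ("TOBA" :: "TEK" :: "SINGH" :: rest) =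
      ("TOBA TEK SINGH",
        if PySem.Str.join " " rest = "" then "TOBA TEK SINGH" else PySem.Str.join " " rest) := by
  unfold pvBcore
  have hb : pvBestOf ("TOBA" :: "TEK" :: "SINGH" :: rest) = 3 := bestOf_toba _ (by simp)
  rw [hb]
  simp [show PySem.Str.join " " ["TOBA","TEK","SINGH"] = "TOBA TEK SINGH" from rfl]

theorem core (lbl : String) (parts : List String) (hwf : ∀ w ∈ parts, WFree w.toList) :
    (splitLoopA parts [3,2,1]).getD (lbl, lbl) = pvBcore lbl parts := by
  match parts, hwf with
  | [], hwf =>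
    have h0 : pvBestOf ([] : List String) = 0 := rfl
    simp [splitLoopA, pvBcore, h0]
  | [a], hwf =>
    rw [Bcore_ne lbl a [] (bestOf_le_one _ (by simp))]
    simp [splitLoopA, PySem.List.slice_to, PySem.List.slice_from, str_join_singleton,
      str_join_nil, strip_empty]
  | [a, b], hwf =>
    have wfa := hwf a (by simp)
    have wfb := hwf b (by simp)
    have f2 : PySem.Str.join " " [a, b] ∉ cityHints := join2_not_mem a b wfa wfb
    have hsb : PySem.Str.strip b = b := by
      have h := str_join_strip [b] (by intro w hw; simp at hw; subst hw; exact wfb)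
      rwa [str_join_singleton] at h
    rw [Bcore_ne lbl a [b] (bestOf_le_one _ (by simp))]
    simp [splitLoopA, PySem.List.slice_to, PySem.List.slice_from, str_join_singleton, f2, hsb]
  | a :: b :: c :: rest, hwf =>
    have wfa := hwf a (by simp)
    have wfb := hwf b (by simp)
    have wfc := hwf c (by simp)
    by_cases hm : (a :: b :: c :: rest).take 3 = ["TOBA","TEK","SINGH"]
    · simp only [List.take_succ_cons, List.take_zero, List.cons.injEq, and_true] at hm
      obtain ⟨rfl, rfl, rfl⟩ := hm
      rw [Bcore_toba]
      have hst : PySem.Str.strip (PySem.Str.join " " rest) = PySem.Str.join " " rest :=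
        str_join_strip rest (fun w hw => hwf w (by simp [hw]))
      simp [splitLoopA, PySem.List.slice_to, PySem.List.slice_from, mem_toba, hst,
        show PySem.Str.join " " ["TOBA","TEK","SINGH"] = "TOBA TEK SINGH" from rfl]
      rw [if_pos (show (3:Int) ≤ (rest.length : Int) + 1 + 1 + 1 by omega)]
      rfl
    · have f3 : PySem.Str.join " " [a, b, c] ∉ cityHints := by
        intro hmem
        obtain ⟨h1, h2, h3⟩ := join3_mem a b c wfa wfb wfc hmem
        exact hm (by simp [h1, h2, h3])
      have f2 : PySem.Str.join " " [a, b] ∉ cityHints := join2_not_mem a b wfa wfb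
      have hst : PySem.Str.strip (PySem.Str.join " " (b :: c :: rest)) =
          PySem.Str.join " " (b :: c :: rest) :=
        str_join_strip _ (fun w hw => hwf w (List.mem_cons_of_mem a hw))
      rw [Bcore_ne lbl a (b :: c :: rest) (bestOf_le_one _ hm)]
      simp [splitLoopA, PySem.List.slice_to, PySem.List.slice_from, str_join_singleton,
        f3, f2, hst]
      rw [if_pos (show (0:Int) ≤ (rest.length : Int) + 1 + 1 by positivity)]
      rfl

theorem a_unfold (label : String) :
    split_city_area label =
      (splitLoopA (PySem.Str.split₀ (PySem.Str.join " " (PySem.Str.split₀ label))) [3, 2, 1]).getD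
        (PySem.Str.join " " (PySem.Str.split₀ label), PySem.Str.join " " (PySem.Str.split₀ label)) := by
  simp only [split_city_area]
  generalize splitLoopA (PySem.Str.split₀ (PySem.Str.join " " (PySem.Str.split₀ label))) [3, 2, 1] = o
  cases o <;> rfl

theorem b_unfold (label : String) :
    split_city_area_alt label =
      pvBcore (PySem.Str.join " " (PySem.Str.split₀ label))
        (PySem.Str.split₀ (PySem.Str.join " " (PySem.Str.split₀ label))) := by
  simp only [split_city_area_alt, pvBcore, pvBestOf]

-- ===== VERDICT (by name: the statement is the Claim_ definition above) =====
theorem split_city_area_spec : Claim_equal_split_city_area := by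
  intro label _
  unfold Spec_split_city_area
  rw [a_unfold, b_unfold]
  exact core (PySem.Str.join " " (PySem.Str.split₀ label)) _ (str_split₀_wfree _)
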